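-- pv_equiv track=rewrite | github.com/OSCC-Project/iPCL-R | experiments/symbol_analysis/embedding_visualizer.py | _generate_domain_labels
-- ===== SOURCE A (Python) =====
-- from typing import List, Optional, Sequence, Tuple, Union
--
-- def _generate_domain_labels(
--     tokens: List[str], grouping_type: str
-- ) -> List[str]:
--     """Generate proper domain token labels based on grouping type"""
--     labels = []
--
--     if grouping_type == "6group":
--         # Individual direction grouping: U*, D*, L*, R*, T*, B*, SPECIAL
--         for token in tokens:
--             first_char = token[0] if token else "SPECIAL"
--             if first_char in {"U", "D", "L", "R", "T", "B"}:
--                 labels.append(f"{first_char}*")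
--             else:
--                 labels.append("SPECIAL")
--     else:
--         # Combined direction grouping: U-D, L-R, T-B, SPECIAL
--         for token in tokens:
--             first_char = token[0] if token else "SPECIAL"
--             if first_char in {"U", "D"}:
--                 labels.append("U-D")
--             elif first_char in {"L", "R"}:
--                 labels.append("L-R")
--             elif first_char in {"T", "B"}:
--                 labels.append("T-B")
--             else:
--                 labels.append("SPECIAL")
--
--     return labels
-- ===== SOURCE B (Python) =====
-- def _generate_domain_labels(tokens, grouping_type):
--     """Index-arithmetic scheme: locate the first character in the direction
--     string 'UDLRTB'; the 6-group label is that character plus '*', and the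
--     combined label is computed from the even-aligned pair DIRS[j], DIRS[j+1]
--     with j = i - i % 2 -- no membership chain and no stored label table."""
--     DIRS = "UDLRTB"
--     six = grouping_type == "6group"
--     labels = []
--     for token in tokens:
--         i = DIRS.find(token[0]) if token else -1
--         if i < 0:
--             labels.append("SPECIAL")
--         elif six:
--             labels.append(DIRS[i] + "*")
--         else:
--             j = i - i % 2
--             labels.append(DIRS[j] + "-" + DIRS[j + 1])
--     return labels
-- ===== Notes on version B (the rewrite author's own statement) =====
-- stated objective: alternative
-- what changed: Replaced A's two branch-per-label loops (set-membership if/elif chains with hard-coded label strings) by an index-arithmetic scheme: the first character is located in the direction string 'UDLRTB' via find, the 6-group label is that character plus '*', and the combined pair label is computed from the even-aligned pair DIRS[j], DIRS[j+1] with j = i - i%2, exploiting that opposite directions are adjacent in the string.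
import Mathlib
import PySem

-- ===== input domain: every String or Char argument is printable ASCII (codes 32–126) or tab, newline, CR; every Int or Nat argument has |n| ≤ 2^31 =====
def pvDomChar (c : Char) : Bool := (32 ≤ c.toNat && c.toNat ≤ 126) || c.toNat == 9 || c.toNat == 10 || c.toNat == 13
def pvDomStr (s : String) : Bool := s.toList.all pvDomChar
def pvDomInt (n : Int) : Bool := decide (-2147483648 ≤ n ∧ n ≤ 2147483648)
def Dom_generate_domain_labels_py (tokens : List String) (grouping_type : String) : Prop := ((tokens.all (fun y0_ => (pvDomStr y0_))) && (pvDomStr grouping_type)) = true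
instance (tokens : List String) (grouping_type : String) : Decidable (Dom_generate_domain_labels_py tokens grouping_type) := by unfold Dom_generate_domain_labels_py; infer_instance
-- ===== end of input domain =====

-- B replaces A's two branch-per-label loops by index arithmetic on the direction string "UDLRTB": the pair label is computed from the even-aligned pair DIRS[j], DIRS[j+1] with j = i - i % 2 (objective: alternative).

-- ===== PORT A =====
-- token[0] if token else "SPECIAL": the first character as a 1-char string, or "SPECIAL" for an empty token
def pvFirstChar (token : String) : String :=
  match token.toList with
  | [] => "SPECIAL"
  | c :: _ => String.ofList [c]

def generate_domain_labels_py (tokens : List String) (grouping_type : String) : List String :=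
  if grouping_type == "6group" then
    tokens.foldl (fun labels token =>
      let first_char := pvFirstChar token
      if first_char == "U" || first_char == "D" || first_char == "L" ||
         first_char == "R" || first_char == "T" || first_char == "B" then
        labels ++ [first_char ++ "*"]
      else
        labels ++ ["SPECIAL"]) []
  else
    tokens.foldl (fun labels token =>
      let first_char := pvFirstChar token
      if first_char == "U" || first_char == "D" then labels ++ ["U-D"]
      else if first_char == "L" || first_char == "R" then labels ++ ["L-R"]
      else if first_char == "T" || first_char == "B" then labels ++ ["T-B"]
      else labels ++ ["SPECIAL"]) []

-- ===== PORT B =====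
-- DIRS[i] for an in-range Int index, as a 1-char string (Source B only indexes with 0 ≤ i < 6)
def pvCharAt (s : String) (i : Int) : String :=
  match PySem.Str.pyGet? s i with
  | some c => String.ofList [c]
  | none => ""

-- DIRS.find(token[0]) if token else -1
def pvDirIndex (token : String) : Int :=
  match token.toList with
  | [] => -1
  | c :: _ => PySem.Str.find "UDLRTB" (String.ofList [c])

def generate_domain_labels_py_alt (tokens : List String) (grouping_type : String) : List String :=
  let six := grouping_type == "6group"
  tokens.foldl (fun labels token =>
    let i := pvDirIndex token
    if i < 0 then labels ++ ["SPECIAL"]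
    else if six then labels ++ [pvCharAt "UDLRTB" i ++ "*"]
    else
      let j := i - PySem.Int.mod i 2
      labels ++ [pvCharAt "UDLRTB" j ++ "-" ++ pvCharAt "UDLRTB" (j + 1)]) []

-- ===== PRECONDITION & SPEC =====
def Spec_generate_domain_labels_py (tokens : List String) (grouping_type : String) (out : List String) : Prop := out = generate_domain_labels_py_alt tokens grouping_type
instance (tokens : List String) (grouping_type : String) (out : List String) : Decidable (Spec_generate_domain_labels_py tokens grouping_type out) := by unfold Spec_generate_domain_labels_py; infer_instance

-- ===== CLAIM (what is proved, stated in full; the proofs are below) =====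
def Claim_equal_generate_domain_labels_py : Prop := ∀ (tokens : List String) (grouping_type : String), Dom_generate_domain_labels_py tokens grouping_type → Spec_generate_domain_labels_py tokens grouping_type (generate_domain_labels_py tokens grouping_type)

-- ===== LEMMAS AND PROOFS =====

-- one-char strings are equal iff their characters are
theorem pv_key_eq (c x : Char) : (String.ofList [x] == String.ofList [c]) = (x == c) := by
  simp only [beq_eq_beq]
  constructor
  · intro h; have := congrArg String.toList h; simpa using this
  · intro h; rw [h]

-- a character outside {U,D,L,R,T,B} is not found in "UDLRTB"
theorem pv_find_neg (c : Char) (h1 : c ≠ 'U') (h2 : c ≠ 'D') (h3 : c ≠ 'L')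
    (h4 : c ≠ 'R') (h5 : c ≠ 'T') (h6 : c ≠ 'B') :
    PySem.Str.find "UDLRTB" (String.ofList [c]) = -1 := by
  rw [PySem.Str.find_eq]
  rw [PySem.Chars.find_eq_neg_one_iff]
  intro hinf
  have hsub := hinf.sublist
  have hc : (String.ofList [c]).toList = [c] := by simp
  rw [hc] at hsub
  have hmem : c ∈ ("UDLRTB" : String).toList := List.singleton_sublist.mp hsub
  have : ("UDLRTB" : String).toList = ['U','D','L','R','T','B'] := rfl
  rw [this] at hmem
  simp at hmem
  rcases hmem with h|h|h|h|h|h <;> [exact h1 h; exact h2 h; exact h3 h; exact h4 h; exact h5 h; exact h6 h]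

-- per-character agreement, "6group" branch
theorem pv_elem_6group_char (c : Char) :
    (if String.ofList [c] == "U" || String.ofList [c] == "D" || String.ofList [c] == "L" ||
        String.ofList [c] == "R" || String.ofList [c] == "T" || String.ofList [c] == "B" then
       String.ofList [c] ++ "*"
     else "SPECIAL")
    = (let i := PySem.Str.find "UDLRTB" (String.ofList [c])
       if i < 0 then "SPECIAL"
       else pvCharAt "UDLRTB" i ++ "*") := by
  by_cases h1 : c = 'U'; · subst h1; decide
  by_cases h2 : c = 'D'; · subst h2; decide
  by_cases h3 : c = 'L'; · subst h3; decide
  by_cases h4 : c = 'R'; · subst h4; decide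
  by_cases h5 : c = 'T'; · subst h5; decide
  by_cases h6 : c = 'B'; · subst h6; decide
  have hf := pv_find_neg c h1 h2 h3 h4 h5 h6
  have hU : ("U" : String) = String.ofList ['U'] := rfl
  have hD : ("D" : String) = String.ofList ['D'] := rfl
  have hL : ("L" : String) = String.ofList ['L'] := rfl
  have hR : ("R" : String) = String.ofList ['R'] := rfl
  have hT : ("T" : String) = String.ofList ['T'] := rfl
  have hB : ("B" : String) = String.ofList ['B'] := rfl
  simp only [hU, hD, hL, hR, hT, hB, pv_key_eq, hf]
  simp [h1, h2, h3, h4, h5, h6]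

-- per-character agreement, combined branch
theorem pv_elem_comb_char (c : Char) :
    (if String.ofList [c] == "U" || String.ofList [c] == "D" then "U-D"
     else if String.ofList [c] == "L" || String.ofList [c] == "R" then "L-R"
     else if String.ofList [c] == "T" || String.ofList [c] == "B" then "T-B"
     else "SPECIAL")
    = (let i := PySem.Str.find "UDLRTB" (String.ofList [c])
       if i < 0 then "SPECIAL"
       else
         let j := i - PySem.Int.mod i 2
         pvCharAt "UDLRTB" j ++ "-" ++ pvCharAt "UDLRTB" (j + 1)) := by
  by_cases h1 : c = 'U'; · subst h1; decide
  by_cases h2 : c = 'D'; · subst h2; decide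
  by_cases h3 : c = 'L'; · subst h3; decide
  by_cases h4 : c = 'R'; · subst h4; decide
  by_cases h5 : c = 'T'; · subst h5; decide
  by_cases h6 : c = 'B'; · subst h6; decide
  have hf := pv_find_neg c h1 h2 h3 h4 h5 h6
  have hU : ("U" : String) = String.ofList ['U'] := rfl
  have hD : ("D" : String) = String.ofList ['D'] := rfl
  have hL : ("L" : String) = String.ofList ['L'] := rfl
  have hR : ("R" : String) = String.ofList ['R'] := rfl
  have hT : ("T" : String) = String.ofList ['T'] := rfl
  have hB : ("B" : String) = String.ofList ['B'] := rfl
  simp only [hU, hD, hL, hR, hT, hB, pv_key_eq, hf]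
  simp [h1, h2, h3, h4, h5, h6]

-- per-token versions
theorem pv_elem_6group (token : String) :
    (if pvFirstChar token == "U" || pvFirstChar token == "D" || pvFirstChar token == "L" ||
        pvFirstChar token == "R" || pvFirstChar token == "T" || pvFirstChar token == "B" then
       pvFirstChar token ++ "*"
     else "SPECIAL")
    = (if pvDirIndex token < 0 then "SPECIAL"
       else pvCharAt "UDLRTB" (pvDirIndex token) ++ "*") := by
  unfold pvFirstChar pvDirIndex
  rcases token.toList with _ | ⟨c, cs⟩
  · decide
  · exact pv_elem_6group_char c

theorem pv_elem_comb (token : String) :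
    (if pvFirstChar token == "U" || pvFirstChar token == "D" then "U-D"
     else if pvFirstChar token == "L" || pvFirstChar token == "R" then "L-R"
     else if pvFirstChar token == "T" || pvFirstChar token == "B" then "T-B"
     else "SPECIAL")
    = (if pvDirIndex token < 0 then "SPECIAL"
       else
         pvCharAt "UDLRTB" (pvDirIndex token - PySem.Int.mod (pvDirIndex token) 2) ++ "-" ++
         pvCharAt "UDLRTB" (pvDirIndex token - PySem.Int.mod (pvDirIndex token) 2 + 1)) := by
  unfold pvFirstChar pvDirIndex
  rcases token.toList with _ | ⟨c, cs⟩
  · decide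
  · exact pv_elem_comb_char c

-- both ports as maps over tokens
theorem pvB_map (tokens : List String) (gt : String) :
    generate_domain_labels_py_alt tokens gt =
    tokens.map (fun token =>
      if pvDirIndex token < 0 then "SPECIAL"
      else if gt == "6group" then pvCharAt "UDLRTB" (pvDirIndex token) ++ "*"
      else
        pvCharAt "UDLRTB" (pvDirIndex token - PySem.Int.mod (pvDirIndex token) 2) ++ "-" ++
        pvCharAt "UDLRTB" (pvDirIndex token - PySem.Int.mod (pvDirIndex token) 2 + 1)) := by
  unfold generate_domain_labels_py_alt
  show List.foldl (fun (labels : List String) (token : String) =>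
      if pvDirIndex token < 0 then labels ++ ["SPECIAL"]
      else if gt == "6group" then labels ++ [pvCharAt "UDLRTB" (pvDirIndex token) ++ "*"]
      else labels ++ [pvCharAt "UDLRTB" (pvDirIndex token - PySem.Int.mod (pvDirIndex token) 2) ++ "-" ++
                      pvCharAt "UDLRTB" (pvDirIndex token - PySem.Int.mod (pvDirIndex token) 2 + 1)]) [] tokens = _
  have hbody : (fun (labels : List String) (token : String) =>
      if pvDirIndex token < 0 then labels ++ ["SPECIAL"]
      else if gt == "6group" then labels ++ [pvCharAt "UDLRTB" (pvDirIndex token) ++ "*"]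
      else labels ++ [pvCharAt "UDLRTB" (pvDirIndex token - PySem.Int.mod (pvDirIndex token) 2) ++ "-" ++
                      pvCharAt "UDLRTB" (pvDirIndex token - PySem.Int.mod (pvDirIndex token) 2 + 1)])
      = fun labels token => labels ++
          [if pvDirIndex token < 0 then "SPECIAL"
           else if gt == "6group" then pvCharAt "UDLRTB" (pvDirIndex token) ++ "*"
           else
             pvCharAt "UDLRTB" (pvDirIndex token - PySem.Int.mod (pvDirIndex token) 2) ++ "-" ++
             pvCharAt "UDLRTB" (pvDirIndex token - PySem.Int.mod (pvDirIndex token) 2 + 1)] := by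
    funext labels token
    split
    · rfl
    · split <;> rfl
  rw [hbody, PySem.List.foldl_append_singleton_eq_map, List.nil_append]

theorem pvA6_map (tokens : List String) :
    List.foldl (fun (labels : List String) (token : String) =>
      let first_char := pvFirstChar token
      if first_char == "U" || first_char == "D" || first_char == "L" ||
         first_char == "R" || first_char == "T" || first_char == "B" then
        labels ++ [first_char ++ "*"]
      else labels ++ ["SPECIAL"]) [] tokens
    = tokens.map (fun token =>
        if pvFirstChar token == "U" || pvFirstChar token == "D" || pvFirstChar token == "L" ||
           pvFirstChar token == "R" || pvFirstChar token == "T" || pvFirstChar token == "B" then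
          pvFirstChar token ++ "*"
        else "SPECIAL") := by
  have hbody : (fun (labels : List String) (token : String) =>
      let first_char := pvFirstChar token
      if first_char == "U" || first_char == "D" || first_char == "L" ||
         first_char == "R" || first_char == "T" || first_char == "B" then
        labels ++ [first_char ++ "*"]
      else labels ++ ["SPECIAL"])
      = fun labels token => labels ++
          [if pvFirstChar token == "U" || pvFirstChar token == "D" || pvFirstChar token == "L" ||
              pvFirstChar token == "R" || pvFirstChar token == "T" || pvFirstChar token == "B" then
             pvFirstChar token ++ "*"
           else "SPECIAL"] := by
    funext labels token; simp only []; split <;> rfl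
  rw [hbody, PySem.List.foldl_append_singleton_eq_map, List.nil_append]

theorem pvAc_map (tokens : List String) :
    List.foldl (fun (labels : List String) (token : String) =>
      let first_char := pvFirstChar token
      if first_char == "U" || first_char == "D" then labels ++ ["U-D"]
      else if first_char == "L" || first_char == "R" then labels ++ ["L-R"]
      else if first_char == "T" || first_char == "B" then labels ++ ["T-B"]
      else labels ++ ["SPECIAL"]) [] tokens
    = tokens.map (fun token =>
        if pvFirstChar token == "U" || pvFirstChar token == "D" then "U-D"
        else if pvFirstChar token == "L" || pvFirstChar token == "R" then "L-R"
        else if pvFirstChar token == "T" || pvFirstChar token == "B" then "T-B"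
        else "SPECIAL") := by
  have hbody : (fun (labels : List String) (token : String) =>
      let first_char := pvFirstChar token
      if first_char == "U" || first_char == "D" then labels ++ ["U-D"]
      else if first_char == "L" || first_char == "R" then labels ++ ["L-R"]
      else if first_char == "T" || first_char == "B" then labels ++ ["T-B"]
      else labels ++ ["SPECIAL"])
      = fun labels token => labels ++
          [if pvFirstChar token == "U" || pvFirstChar token == "D" then "U-D"
           else if pvFirstChar token == "L" || pvFirstChar token == "R" then "L-R"
           else if pvFirstChar token == "T" || pvFirstChar token == "B" then "T-B"
           else "SPECIAL"] := by
    funext labels token; simp only []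
    split
    · rfl
    · split
      · rfl
      · split <;> rfl
  rw [hbody, PySem.List.foldl_append_singleton_eq_map, List.nil_append]

-- ===== VERDICT (by name: the statement is the Claim_ definition above) =====
theorem generate_domain_labels_py_spec : Claim_equal_generate_domain_labels_py := by
  intro tokens grouping_type _
  unfold Spec_generate_domain_labels_py
  rw [pvB_map]
  unfold generate_domain_labels_py
  have htt : ∀ {α : Type} (a b : α), (if true = true then a else b) = a := fun a b => rfl
  have hff : ∀ {α : Type} (a b : α), (if false = true then a else b) = b := fun a b => rfl
  by_cases hg : (grouping_type == "6group") = true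
  · rw [if_pos hg, pvA6_map]
    refine List.map_congr_left (fun t _ => ?_)
    rw [hg, htt]
    exact pv_elem_6group t
  · rw [if_neg hg, pvAc_map]
    have hg' : (grouping_type == "6group") = false := by
      cases h : (grouping_type == "6group") <;> simp_all
    refine List.map_congr_left (fun t _ => ?_)
    rw [hg', hff]
    exact pv_elem_comb t
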